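-- pv_equiv track=rewrite | github.com/nextboxis/DNS-Sinkhole | scripts/dns_monitor.py | check_typosquatting
-- ===== SOURCE A (Python) =====
-- from typing import Any, Dict, List, Optional, Tuple
--
-- POPULAR_DOMAINS = frozenset({
--     "google.com", "microsoft.com", "apple.com", "amazon.com", "facebook.com",
--     "instagram.com", "twitter.com", "linkedin.com", "netflix.com", "paypal.com",
--     "bankofamerica.com", "chase.com", "wellsfargo.com", "github.com",
-- })
--
-- def levenshtein_distance(s1: str, s2: str) -> int:
--     """Compute the minimum edit distance between two strings."""
--     if len(s1) < len(s2):
--         return levenshtein_distance(s2, s1)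
--     if len(s2) == 0:
--         return len(s1)
--     previous_row = range(len(s2) + 1)
--     for i, c1 in enumerate(s1):
--         current_row = [i + 1]
--         for j, c2 in enumerate(s2):
--             insertions = previous_row[j + 1] + 1
--             deletions = current_row[j] + 1
--             substitutions = previous_row[j] + (c1 != c2)
--             current_row.append(min(insertions, deletions, substitutions))
--         previous_row = current_row
--     return previous_row[-1]
--
-- def check_typosquatting(domain: str) -> Optional[str]:
--     """Check if a domain is a potential typosquatting attempt using Levenshtein distance."""
--     domain = domain.lower().rstrip(".")
--     if domain in POPULAR_DOMAINS:
--         return None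
--
--     norm_domain = domain.replace("i", "l").replace("1", "l").replace("0", "o")
--
--     for popular in POPULAR_DOMAINS:
--         norm_pop = popular.replace("i", "l").replace("1", "l").replace("0", "o")
--         if norm_domain == norm_pop:
--             return popular
--
--         if abs(len(domain) - len(popular)) > 2:
--             continue
--         if levenshtein_distance(domain, popular) == 1:
--             return popular
--     return None
-- ===== SOURCE B (Python) =====
-- from typing import Optional
--
-- POPULAR_DOMAINS = frozenset({
--     "google.com", "microsoft.com", "apple.com", "amazon.com", "facebook.com",
--     "instagram.com", "twitter.com", "linkedin.com", "netflix.com", "paypal.com",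
--     "bankofamerica.com", "chase.com", "wellsfargo.com", "github.com",
-- })
--
-- def is_one_edit(a: str, b: str) -> bool:
--     """True iff a and b are exactly one edit (sub/ins/del) apart."""
--     if len(a) == len(b):
--         return sum(1 for x, y in zip(a, b) if x != y) == 1
--     if len(a) > len(b):
--         a, b = b, a
--     if len(b) - len(a) != 1:
--         return False
--     # b is a with exactly one character inserted: skip the common
--     # prefix, then the rest of a must equal b with its next char dropped.
--     i = 0
--     while i < len(a) and a[i] == b[i]:
--         i += 1
--     return a[i:] == b[i + 1:]
--
-- def check_typosquatting(domain: str) -> Optional[str]: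
--     """Check if a domain is a potential typosquatting attempt."""
--     domain = domain.lower().rstrip(".")
--     if domain in POPULAR_DOMAINS:
--         return None
--
--     norm_domain = domain.replace("i", "l").replace("1", "l").replace("0", "o")
--
--     for popular in POPULAR_DOMAINS:
--         norm_pop = popular.replace("i", "l").replace("1", "l").replace("0", "o")
--         if norm_domain == norm_pop:
--             return popular
--         if is_one_edit(domain, popular):
--             return popular
--     return None
-- ===== Notes on version B (the rewrite author's own statement) =====
-- stated objective: alternative
-- what changed: Replaces the O(len1*len2) Levenshtein dynamic-programming table with a direct one-edit test (equal length: exactly one mismatching position; length difference 1: single aligned prefix/suffix scan), which is exactly equivalent to edit distance == 1, dropping the length guard and the DP entirely.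
import Mathlib
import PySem

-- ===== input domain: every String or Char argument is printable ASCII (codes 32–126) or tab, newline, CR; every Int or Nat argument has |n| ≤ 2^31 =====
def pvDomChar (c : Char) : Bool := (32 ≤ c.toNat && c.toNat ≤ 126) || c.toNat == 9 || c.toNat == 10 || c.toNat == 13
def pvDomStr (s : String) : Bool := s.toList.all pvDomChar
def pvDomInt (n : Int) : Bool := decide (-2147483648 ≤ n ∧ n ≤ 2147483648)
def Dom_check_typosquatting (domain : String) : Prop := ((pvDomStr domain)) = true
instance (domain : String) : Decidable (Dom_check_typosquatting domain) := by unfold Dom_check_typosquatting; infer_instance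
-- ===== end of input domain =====

-- B replaces A's Levenshtein DP with a direct one-edit scan; same result, no DP table (objective: alternative).
-- The popular-domain frozenset is ported in its written literal order; no input matches two populars, so order is immaterial.

-- ===== PORT A =====

-- POPULAR_DOMAINS: the frozenset's distinct elements, in the literal's written order.
def POPULAR : List (List Char) :=
  ["google.com".toList, "microsoft.com".toList, "apple.com".toList, "amazon.com".toList,
   "facebook.com".toList, "instagram.com".toList, "twitter.com".toList, "linkedin.com".toList,
   "netflix.com".toList, "paypal.com".toList, "bankofamerica.com".toList, "chase.com".toList,
   "wellsfargo.com".toList, "github.com".toList]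

-- domain.replace("i","l").replace("1","l").replace("0","o")
def pyNorm (cs : List Char) : List Char :=
  PySem.Chars.replace (PySem.Chars.replace (PySem.Chars.replace cs ['i'] ['l']) ['1'] ['l']) ['0'] ['o']

-- inner loop of the DP: walks s2 and previous_row in lockstep, `left` = last element of current_row
def levCoreInner (c1 : Char) : List Char → List Int → Int → List Int
  | c2 :: t, p0 :: p1 :: prest, left =>
      left :: levCoreInner c1 t (p1 :: prest)
        (min (min (p1 + 1) (left + 1)) (p0 + (if c1 ≠ c2 then 1 else 0)))
  | _, _, left => [left]

-- outer loop: `for i, c1 in enumerate(s1)` carried as an explicit counter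
def levRows (s2 : List Char) : List Char → List Int → Int → List Int
  | [], prev, _ => prev
  | c1 :: rest, prev, i => levRows s2 rest (levCoreInner c1 s2 prev (i + 1)) (i + 1)

def levCore (s1 s2 : List Char) : Int :=
  if s2.length = 0 then (s1.length : Int)
  else
    let init : List Int := (List.range (s2.length + 1)).map (fun j => Int.ofNat j)
    let final := levRows s2 s1 init 0
    (PySem.List.pyGet? final (-1)).getD 0  -- previous_row[-1]; the row is provably nonempty

-- the `if len(s1) < len(s2): return levenshtein_distance(s2, s1)` swap, unrolled once
def levenshtein_distance (s1 s2 : List Char) : Int :=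
  if s1.length < s2.length then levCore s2 s1 else levCore s1 s2

def loopA (d nd : List Char) : List (List Char) → Option (List Char)
  | [] => none
  | p :: ps =>
    if nd = pyNorm p then some p
    else if 2 < ((d.length : Int) - (p.length : Int)).natAbs then loopA d nd ps
    else if levenshtein_distance d p = 1 then some p
    else loopA d nd ps

def check_typosquatting (domain : String) : Option String :=
  -- domain.lower().rstrip("."): rstrip(".") removes all trailing '.' characters (exact)
  let d := ((PySem.Chars.lower domain.toList).reverse.dropWhile (fun c => c = '.')).reverse
  if d ∈ POPULAR then none
  else (loopA d (pyNorm d) POPULAR).map (fun p => String.ofList p)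

-- ===== PORT B =====

-- the while loop of is_one_edit: skip the common prefix, then a[i:] == b[i+1:]
def skipPrefix : List Char → List Char → Bool
  | x :: a, y :: b => if x = y then skipPrefix a b else (x :: a) = b
  | [], b => b.drop 1 = ([] : List Char)
  | _ :: _, [] => false

def is_one_edit (a b : List Char) : Bool :=
  if a.length = b.length then
    ((a.zip b).countP (fun xy => xy.1 ≠ xy.2)) == 1
  else
    let ab := if a.length > b.length then (b, a) else (a, b)
    if ab.2.length - ab.1.length ≠ 1 then false
    else skipPrefix ab.1 ab.2

def loopB (d nd : List Char) : List (List Char) → Option (List Char)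
  | [] => none
  | p :: ps =>
    if nd = pyNorm p then some p
    else if is_one_edit d p then some p
    else loopB d nd ps

def check_typosquatting_alt (domain : String) : Option String :=
  let d := ((PySem.Chars.lower domain.toList).reverse.dropWhile (fun c => c = '.')).reverse
  if d ∈ POPULAR then none
  else (loopB d (pyNorm d) POPULAR).map (fun p => String.ofList p)

-- ===== PRECONDITION & SPEC =====
def Spec_check_typosquatting (domain : String) (out : Option String) : Prop := out = check_typosquatting_alt domain
instance (domain : String) (out : Option String) : Decidable (Spec_check_typosquatting domain out) := by unfold Spec_check_typosquatting; infer_instance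

-- ===== CLAIM (what is proved, stated in full; the proofs are below) =====
def Claim_equal_check_typosquatting : Prop := ∀ (domain : String), Dom_check_typosquatting domain → Spec_check_typosquatting domain (check_typosquatting domain)

-- ===== LEMMAS AND PROOFS =====

-- the classic recursive edit distance
def E : List Char → List Char → Nat
  | [], t => t.length
  | _ :: s, [] => s.length + 1
  | a :: s, b :: t => if a = b then E s t else 1 + min (min (E s (b :: t)) (E (a :: s) t)) (E s t)
termination_by s t => (s.length, t.length)

theorem E_nil_right (s : List Char) : E s [] = s.length := by
  cases s <;> simp [E]

theorem E_self (s : List Char) : E s s = 0 := by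
  induction s with
  | nil => simp [E]
  | cons a s ih => simp [E, ih]

theorem E_eq_zero (s : List Char) : ∀ t, E s t = 0 ↔ s = t := by
  induction s with
  | nil => intro t; cases t <;> simp [E]
  | cons a s ih =>
    intro t
    cases t with
    | nil => simp [E]
    | cons b t =>
      by_cases hab : a = b
      · subst hab; simp [E, ih]
      · simp [E, hab]

-- adjacency: adding/removing one head character changes the distance by at most 1
theorem E_adj (n : Nat) : ∀ s t : List Char, s.length + t.length ≤ n → ∀ c : Char,
    (E s t ≤ E (c :: s) t + 1 ∧ E (c :: s) t ≤ E s t + 1) ∧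
    (E s t ≤ E s (c :: t) + 1 ∧ E s (c :: t) ≤ E s t + 1) := by
  induction n with
  | zero => intro s t h c; cases s <;> cases t <;> simp_all [E]
  | succ n ih =>
    intro s t h c
    refine ⟨⟨?_, ?_⟩, ?_, ?_⟩
    · -- E s t ≤ E (c :: s) t + 1
      cases t with
      | nil => simp [E_nil_right, E] <;> omega
      | cons b t' =>
        by_cases hcb : c = b
        · subst hcb
          have h4 := ((ih s t' (by simp at h; omega) c).2).2
          simp [E] <;> omega
        · have h4 := ((ih s t' (by simp at h; omega) b).2).2
          have h1 := ((ih s t' (by simp at h; omega) c).1).1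
          simp only [E, if_neg hcb]
          simp only [Nat.min_def]; split_ifs <;> omega
    · -- E (c :: s) t ≤ E s t + 1
      cases t with
      | nil => simp [E_nil_right, E] <;> omega
      | cons b t' =>
        by_cases hcb : c = b
        · subst hcb
          have h3 := ((ih s t' (by simp at h; omega) c).2).1
          simp [E] <;> omega
        · simp only [E, if_neg hcb]
          simp only [Nat.min_def]; split_ifs <;> omega
    · -- E s t ≤ E s (c :: t) + 1
      cases s with
      | nil => simp [E] <;> omega
      | cons a s' =>
        by_cases hac : a = c
        · subst hac
          have h2 := ((ih s' t (by simp at h; omega) a).1).2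
          simp [E] <;> omega
        · have h2 := ((ih s' t (by simp at h; omega) a).1).2
          have h3 := ((ih s' t (by simp at h; omega) c).2).1
          simp only [E, if_neg hac]
          simp only [Nat.min_def]; split_ifs <;> omega
    · -- E s (c :: t) ≤ E s t + 1
      cases s with
      | nil => simp [E] <;> omega
      | cons a s' =>
        by_cases hac : a = c
        · subst hac
          have h1 := ((ih s' t (by simp at h; omega) a).1).1
          simp [E] <;> omega
        · simp only [E, if_neg hac]
          simp only [Nat.min_def]; split_ifs <;> omega

theorem E_le_consL (s t : List Char) (c : Char) : E s t ≤ E (c :: s) t + 1 :=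
  ((E_adj (s.length + t.length) s t le_rfl c).1).1

theorem E_le_consR (s t : List Char) (c : Char) : E s t ≤ E s (c :: t) + 1 :=
  ((E_adj (s.length + t.length) s t le_rfl c).2).1

-- DP row for reversed prefixes X (of s1) and Y (of s2), remaining suffix t of s2
def rowAux : List Char → List Char → List Char → List Int
  | X, Y, [] => [(E X Y : Int)]
  | X, Y, b :: t => (E X Y : Int) :: rowAux X (b :: Y) t

theorem cell_eq (c b : Char) (X Y : List Char) :
    min (min ((E X (b :: Y) : Int) + 1) ((E (c :: X) Y : Int) + 1))
        ((E X Y : Int) + (if c ≠ b then 1 else 0)) = (E (c :: X) (b :: Y) : Int) := by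
  by_cases hcb : c = b
  · subst hcb
    have h1 := E_le_consR X Y c
    have h2 := E_le_consL X Y c
    simp only [E, if_pos rfl]
    simp; omega
  · simp only [E, if_neg hcb]
    simp [hcb]; omega

theorem inner_spec (c : Char) : ∀ (t Y X : List Char),
    levCoreInner c t (rowAux X Y t) ((E (c :: X) Y : Int)) = rowAux (c :: X) Y t := by
  intro t
  induction t with
  | nil => intro Y X; simp [rowAux, levCoreInner]
  | cons b t ih =>
    intro Y X
    have hhead : ∃ r, rowAux X (b :: Y) t = (E X (b :: Y) : Int) :: r := by
      cases t <;> exact ⟨_, rfl⟩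
    obtain ⟨r, hr⟩ := hhead
    show levCoreInner c (b :: t) ((E X Y : Int) :: rowAux X (b :: Y) t) _ = _
    rw [hr]
    show (E (c :: X) Y : Int) ::
        levCoreInner c t ((E X (b :: Y) : Int) :: r)
          (min (min ((E X (b :: Y) : Int) + 1) ((E (c :: X) Y : Int) + 1))
            ((E X Y : Int) + (if c ≠ b then 1 else 0))) = _
    rw [cell_eq, ← hr, ih (b :: Y) X]
    rfl

theorem rows_spec (s2 : List Char) : ∀ (s1 X : List Char),
    levRows s2 s1 (rowAux X [] s2) ((E X ([] : List Char) : Int)) = rowAux (s1.reverse ++ X) [] s2 := by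
  intro s1
  induction s1 with
  | nil => intro X; simp [levRows]
  | cons c rest ih =>
    intro X
    show levRows s2 rest
        (levCoreInner c s2 (rowAux X [] s2) ((E X ([] : List Char) : Int) + 1))
        ((E X ([] : List Char) : Int) + 1) = _
    have h : ((E X ([] : List Char) : Int) + 1) = ((E (c :: X) ([] : List Char) : Int)) := by
      rw [E_nil_right, E_nil_right]; push_cast [List.length_cons]; omega
    rw [h, inner_spec, ih (c :: X)]
    simp

theorem rowAux_init : ∀ (t Y : List Char),
    rowAux [] Y t = (List.range (t.length + 1)).map (fun j => ((Y.length + j : Nat) : Int)) := by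
  intro t
  induction t with
  | nil => intro Y; simp [rowAux, E]
  | cons b t ih =>
    intro Y
    show ((E ([] : List Char) Y : Nat) : Int) :: rowAux [] (b :: Y) t = _
    rw [ih (b :: Y)]
    conv_rhs => rw [show ((b :: t).length + 1) = (t.length + 1) + 1 from by simp,
      List.range_succ_eq_map, List.map_cons, List.map_map]
    congr 1
    · simp [E]
    · apply List.map_congr_left
      intro j _
      simp only [Function.comp_apply, List.length_cons]
      push_cast
      omega

theorem pyGet_neg_one (x : Int) (l : List Int) :
    (PySem.List.pyGet? (x :: l) (-1)).getD 0 = (x :: l).getLast (by simp) := by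
  simp [PySem.List.pyGet?, PySem.List.pyIdx?]
  rw [List.getLast_eq_getElem]
  congr 1

theorem rowAux_getLast? : ∀ (t X Y : List Char),
    (rowAux X Y t).getLast? = some ((E X (t.reverse ++ Y) : Int)) := by
  intro t
  induction t with
  | nil => intro X Y; simp [rowAux]
  | cons b t ih =>
    intro X Y
    show (((E X Y : Nat) : Int) :: rowAux X (b :: Y) t).getLast? = _
    obtain ⟨z, r, hr⟩ : ∃ z r, rowAux X (b :: Y) t = z :: r := by
      cases t <;> exact ⟨_, _, rfl⟩
    rw [hr, List.getLast?_cons_cons, ← hr, ih X (b :: Y)]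
    simp

theorem rowAux_last : ∀ (t X Y : List Char),
    (PySem.List.pyGet? (rowAux X Y t) (-1)).getD 0 = (E X (t.reverse ++ Y) : Int) := by
  intro t X Y
  obtain ⟨z, r, hr⟩ : ∃ z r, rowAux X Y t = z :: r := by
    cases t <;> exact ⟨_, _, rfl⟩
  have hl := rowAux_getLast? t X Y
  rw [hr] at hl ⊢
  rw [pyGet_neg_one]
  rw [List.getLast?_eq_some_getLast (l := z :: r) (by simp)] at hl
  exact Option.some.inj hl

theorem levCore_eq (s1 s2 : List Char) : levCore s1 s2 = (E s1.reverse s2.reverse : Int) := by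
  unfold levCore
  by_cases h0 : s2.length = 0
  · have : s2 = [] := List.length_eq_zero_iff.mp h0
    subst this
    simp [E_nil_right]
  · rw [if_neg h0]
    show (PySem.List.pyGet?
        (levRows s2 s1 ((List.range (s2.length + 1)).map (fun j => Int.ofNat j)) 0) (-1)).getD 0 = _
    have hinit : (List.range (s2.length + 1)).map (fun j => Int.ofNat j) = rowAux [] [] s2 := by
      rw [rowAux_init s2 []]
      apply List.map_congr_left
      intro j _
      simp
    have hrows : levRows s2 s1 ((List.range (s2.length + 1)).map (fun j => Int.ofNat j)) 0
        = rowAux (s1.reverse ++ []) [] s2 := by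
      rw [hinit]
      have hs := rows_spec s2 s1 []
      simpa [E] using hs
    rw [hrows, List.append_nil, rowAux_last]
    simp

-- exactly-one-edit, as a proposition
def OneEdit (s t : List Char) : Prop :=
  (∃ x c d y, c ≠ d ∧ s = x ++ c :: y ∧ t = x ++ d :: y) ∨
  (∃ x c y, s = x ++ c :: y ∧ t = x ++ y) ∨
  (∃ x c y, s = x ++ y ∧ t = x ++ c :: y)

theorem OneEdit_symm {s t : List Char} (h : OneEdit s t) : OneEdit t s := by
  rcases h with ⟨x, c, d, y, hcd, hs, ht⟩ | ⟨x, c, y, hs, ht⟩ | ⟨x, c, y, hs, ht⟩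
  · exact Or.inl ⟨x, d, c, y, Ne.symm hcd, ht, hs⟩
  · exact Or.inr (Or.inr ⟨x, c, y, ht, hs⟩)
  · exact Or.inr (Or.inl ⟨x, c, y, ht, hs⟩)

theorem OneEdit_rev {s t : List Char} (h : OneEdit s t) : OneEdit s.reverse t.reverse := by
  rcases h with ⟨x, c, d, y, hcd, hs, ht⟩ | ⟨x, c, y, hs, ht⟩ | ⟨x, c, y, hs, ht⟩
  · exact Or.inl ⟨y.reverse, c, d, x.reverse, hcd, by simp [hs], by simp [ht]⟩
  · exact Or.inr (Or.inl ⟨y.reverse, c, x.reverse, by simp [hs], by simp [ht]⟩)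
  · exact Or.inr (Or.inr ⟨y.reverse, c, x.reverse, by simp [hs], by simp [ht]⟩)

theorem E_prefix (x : List Char) (u v : List Char) : E (x ++ u) (x ++ v) = E u v := by
  induction x with
  | nil => rfl
  | cons a x ih => simp [E, ih]

theorem E_cons_self : ∀ (y : List Char) (c : Char), E (c :: y) y = 1 := by
  intro y
  induction y with
  | nil => intro c; simp [E]
  | cons d y ih =>
    intro c
    by_cases hch : c = d
    · subst hch; simpa [E] using ih _
    · simp [E, hch, E_self, ih]

theorem E_self_cons : ∀ (y : List Char) (c : Char), E y (c :: y) = 1 := by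
  intro y
  induction y with
  | nil => intro c; simp [E]
  | cons d y ih =>
    intro c
    by_cases hch : d = c
    · subst hch; simpa [E] using ih _
    · simp [E, hch, E_self, ih]

theorem E_one_of_oneEdit {s t : List Char} (h : OneEdit s t) : E s t = 1 := by
  rcases h with ⟨x, c, d, y, hcd, hs, ht⟩ | ⟨x, c, y, hs, ht⟩ | ⟨x, c, y, hs, ht⟩ <;>
    subst hs <;> subst ht <;> rw [E_prefix]
  · simp [E, hcd, E_self, E_cons_self, E_self_cons]
  · exact E_cons_self y c
  · exact E_self_cons y c

theorem OneEdit_cons (a : Char) {s t : List Char} (h : OneEdit s t) : OneEdit (a :: s) (a :: t) := by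
  rcases h with ⟨x, c, d, y, hcd, hs, ht⟩ | ⟨x, c, y, hs, ht⟩ | ⟨x, c, y, hs, ht⟩
  · exact Or.inl ⟨a :: x, c, d, y, hcd, by simp [hs], by simp [ht]⟩
  · exact Or.inr (Or.inl ⟨a :: x, c, y, by simp [hs], by simp [ht]⟩)
  · exact Or.inr (Or.inr ⟨a :: x, c, y, by simp [hs], by simp [ht]⟩)

theorem oneEdit_of_E_one : ∀ s t : List Char, E s t = 1 → OneEdit s t := by
  intro s
  induction s with
  | nil =>
    intro t h
    cases t with
    | nil => simp [E] at h
    | cons d t' =>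
      have ht' : t' = [] := by
        have hlen : t'.length + 1 = 1 := by simpa [E] using h
        exact List.eq_nil_of_length_eq_zero (by omega)
      subst ht'
      exact Or.inr (Or.inr ⟨[], d, [], rfl, rfl⟩)
  | cons a s' ih =>
    intro t h
    cases t with
    | nil =>
      have hs' : s' = [] := by
        have hlen : s'.length + 1 = 1 := by simpa [E] using h
        exact List.eq_nil_of_length_eq_zero (by omega)
      subst hs'
      exact Or.inr (Or.inl ⟨[], a, [], rfl, rfl⟩)
    | cons b t' =>
      by_cases hab : a = b
      · subst hab
        have h' : E s' t' = 1 := by simpa [E] using h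
        exact OneEdit_cons a (ih t' h')
      · have h' : min (min (E s' (b :: t')) (E (a :: s') t')) (E s' t') = 0 := by
          simp [E, hab] at h; omega
        rcases Nat.min_eq_zero_iff.mp h' with h'' | h3
        · rcases Nat.min_eq_zero_iff.mp h'' with h1 | h2
          · have hd := (E_eq_zero s' (b :: t')).mp h1
            exact Or.inr (Or.inl ⟨[], a, b :: t', by simp [hd], rfl⟩)
          · have hi := (E_eq_zero (a :: s') t').mp h2
            exact Or.inr (Or.inr ⟨[], b, a :: s', rfl, by simp [hi]⟩)
        · have hs := (E_eq_zero s' t').mp h3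
          exact Or.inl ⟨[], a, b, s', hab, rfl, by simp [hs]⟩

theorem E_one_iff (s t : List Char) : E s t = 1 ↔ OneEdit s t :=
  ⟨oneEdit_of_E_one s t, E_one_of_oneEdit⟩

theorem OneEdit_len {s t : List Char} (h : OneEdit s t) :
    s.length = t.length ∨ s.length = t.length + 1 ∨ t.length = s.length + 1 := by
  rcases h with ⟨x, c, d, y, _, hs, ht⟩ | ⟨x, c, y, hs, ht⟩ | ⟨x, c, y, hs, ht⟩ <;>
    subst hs <;> subst ht <;> simp <;> omega

theorem OneEdit_rev_iff (s t : List Char) : OneEdit s.reverse t.reverse ↔ OneEdit s t :=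
  ⟨fun h => by simpa using OneEdit_rev h, OneEdit_rev⟩

theorem OneEdit_symm_iff (s t : List Char) : OneEdit s t ↔ OneEdit t s :=
  ⟨OneEdit_symm, OneEdit_symm⟩

theorem lev_one_iff (d p : List Char) : levenshtein_distance d p = 1 ↔ OneEdit d p := by
  unfold levenshtein_distance
  by_cases hlt : d.length < p.length
  · rw [if_pos hlt, levCore_eq]
    rw [show ((1 : Int) = ((1 : Nat) : Int)) from rfl, Nat.cast_inj]
    rw [E_one_iff, OneEdit_rev_iff, OneEdit_symm_iff]
  · rw [if_neg hlt, levCore_eq]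
    rw [show ((1 : Int) = ((1 : Nat) : Int)) from rfl, Nat.cast_inj]
    rw [E_one_iff, OneEdit_rev_iff]

theorem zip_count_zero : ∀ s t : List Char, s.length = t.length →
    (((s.zip t).countP (fun xy => xy.1 ≠ xy.2)) = 0 ↔ s = t) := by
  intro s
  induction s with
  | nil => intro t h; cases t with
    | nil => simp
    | cons b t' => simp at h
  | cons a s' ih =>
    intro t h
    cases t with
    | nil => simp at h
    | cons b t' =>
      have hlen : s'.length = t'.length := by simpa using h
      by_cases hab : a = b
      · subst hab
        have hstep : (((a :: s').zip (a :: t')).countP (fun xy => xy.1 ≠ xy.2))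
            = ((s'.zip t').countP (fun xy => xy.1 ≠ xy.2)) := by
          simp
        rw [hstep, ih t' hlen]
        simp
      · simp [hab]

theorem hamming_one : ∀ s t : List Char, s.length = t.length →
    (((s.zip t).countP (fun xy => xy.1 ≠ xy.2)) = 1 ↔
      ∃ x c d y, c ≠ d ∧ s = x ++ c :: y ∧ t = x ++ d :: y) := by
  intro s
  induction s with
  | nil =>
    intro t h
    have ht : t = [] := List.eq_nil_of_length_eq_zero h.symm
    subst ht
    constructor
    · intro h1; simp at h1
    · rintro ⟨x, c, d, y, _, hs, _⟩; exact absurd hs (by simp)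
  | cons a s' ih =>
    intro t h
    cases t with
    | nil => simp at h
    | cons b t' =>
      have hlen : s'.length = t'.length := by simpa using h
      by_cases hab : a = b
      · subst hab
        have hstep : (((a :: s').zip (a :: t')).countP (fun xy => xy.1 ≠ xy.2))
            = ((s'.zip t').countP (fun xy => xy.1 ≠ xy.2)) := by
          simp
        rw [hstep, ih t' hlen]
        constructor
        · rintro ⟨x, c, d, y, hcd, hs, ht⟩
          exact ⟨a :: x, c, d, y, hcd, by simp [hs], by simp [ht]⟩
        · rintro ⟨x, c, d, y, hcd, hs, ht⟩
          cases x with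
          | nil =>
            simp only [List.nil_append] at hs ht
            rw [List.cons.injEq] at hs ht
            exact absurd (hs.1.symm.trans ht.1) hcd
          | cons e x' =>
            rw [List.cons_append, List.cons.injEq] at hs ht
            exact ⟨x', c, d, y, hcd, hs.2, ht.2⟩
      · have hstep : (((a :: s').zip (b :: t')).countP (fun xy => xy.1 ≠ xy.2))
            = ((s'.zip t').countP (fun xy => xy.1 ≠ xy.2)) + 1 := by
          simp [hab]
        rw [hstep]
        constructor
        · intro h1
          have h0 : ((s'.zip t').countP (fun xy => xy.1 ≠ xy.2)) = 0 := by omega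
          have hst : s' = t' := (zip_count_zero s' t' hlen).mp h0
          exact ⟨[], a, b, s', hab, rfl, by simp [hst]⟩
        · rintro ⟨x, c, d, y, hcd, hs, ht⟩
          cases x with
          | nil =>
            simp only [List.nil_append] at hs ht
            rw [List.cons.injEq] at hs ht
            have hst : s' = t' := hs.2.trans ht.2.symm
            have h0 : ((s'.zip t').countP (fun xy => xy.1 ≠ xy.2)) = 0 :=
              (zip_count_zero s' t' hlen).mpr hst
            omega
          | cons e x' =>
            rw [List.cons_append, List.cons.injEq] at hs ht
            exact absurd (hs.1.trans ht.1.symm) hab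

theorem skipPrefix_iff : ∀ s t : List Char, t.length = s.length + 1 →
    (skipPrefix s t = true ↔ ∃ x c y, s = x ++ y ∧ t = x ++ c :: y) := by
  intro s
  induction s with
  | nil =>
    intro t h
    cases t with
    | nil => simp at h
    | cons d t' =>
      have ht' : t' = [] := List.eq_nil_of_length_eq_zero (by simpa using h)
      subst ht'
      simp only [skipPrefix]
      constructor
      · intro _; exact ⟨[], d, [], rfl, rfl⟩
      · intro _; simp
  | cons x0 s' ih =>
    intro t h
    cases t with
    | nil => simp at h
    | cons y0 t' =>
      have hlen : t'.length = s'.length + 1 := by simpa using h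
      by_cases hxy : x0 = y0
      · subst hxy
        rw [show skipPrefix (x0 :: s') (x0 :: t') = skipPrefix s' t' from by simp [skipPrefix]]
        rw [ih t' hlen]
        constructor
        · rintro ⟨x, c, y, hs, ht⟩
          exact ⟨x0 :: x, c, y, by simp [hs], by simp [ht]⟩
        · rintro ⟨x, c, y, hs, ht⟩
          cases x with
          | nil =>
            simp only [List.nil_append] at hs ht
            rw [List.cons.injEq] at ht
            exact ⟨[], x0, s', rfl, by rw [ht.2, ← hs]; rfl⟩
          | cons e x' =>
            rw [List.cons_append, List.cons.injEq] at hs ht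
            exact ⟨x', c, y, hs.2, ht.2⟩
      · rw [show skipPrefix (x0 :: s') (y0 :: t') = decide ((x0 :: s') = t') from by
          simp [skipPrefix, hxy]]
        constructor
        · intro hd
          have hd' : x0 :: s' = t' := of_decide_eq_true hd
          exact ⟨[], y0, x0 :: s', rfl, by rw [← hd']; rfl⟩
        · rintro ⟨x, c, y, hs, ht⟩
          cases x with
          | nil =>
            simp only [List.nil_append] at hs ht
            rw [List.cons.injEq] at ht
            rw [show t' = x0 :: s' from by rw [ht.2, ← hs]]
            simp
          | cons e x' =>
            rw [List.cons_append, List.cons.injEq] at hs ht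
            exact absurd (hs.1.trans ht.1.symm) hxy

theorem isOneEdit_iff (d p : List Char) : is_one_edit d p = true ↔ OneEdit d p := by
  unfold is_one_edit
  by_cases hlen : d.length = p.length
  · rw [if_pos hlen, beq_iff_eq, hamming_one d p hlen]
    constructor
    · rintro ⟨x, c, e, y, hce, hs, ht⟩; exact Or.inl ⟨x, c, e, y, hce, hs, ht⟩
    · rintro (h | ⟨x, c, y, hs, ht⟩ | ⟨x, c, y, hs, ht⟩)
      · exact h
      · exfalso; subst hs; subst ht
        simp only [List.length_append, List.length_cons] at hlen; omega
      · exfalso; subst hs; subst ht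
        simp only [List.length_append, List.length_cons] at hlen; omega
  · rw [if_neg hlen]
    by_cases hgt : d.length > p.length
    · simp only [gt_iff_lt, if_pos hgt]
      by_cases h1 : d.length - p.length = 1
      · rw [if_neg (by omega), skipPrefix_iff p d (by omega)]
        constructor
        · rintro ⟨x, c, y, hp, hd⟩; exact Or.inr (Or.inl ⟨x, c, y, hd, hp⟩)
        · rintro (⟨x, c, e, y, _, hs, ht⟩ | ⟨x, c, y, hs, ht⟩ | ⟨x, c, y, hs, ht⟩)
          · exfalso; subst hs; subst ht
            simp only [List.length_append, List.length_cons] at hlen h1; omega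
          · exact ⟨x, c, y, ht, hs⟩
          · exfalso; subst hs; subst ht
            simp only [gt_iff_lt, List.length_append, List.length_cons] at hgt; omega
      · rw [if_pos (by omega)]
        constructor
        · intro hf; simp at hf
        · intro hoe
          rcases OneEdit_len hoe with h | h | h <;> omega
    · simp only [gt_iff_lt, if_neg hgt]
      by_cases h1 : p.length - d.length = 1
      · rw [if_neg (by omega), skipPrefix_iff d p (by omega)]
        constructor
        · rintro ⟨x, c, y, hd, hp⟩; exact Or.inr (Or.inr ⟨x, c, y, hd, hp⟩)
        · rintro (⟨x, c, e, y, _, hs, ht⟩ | ⟨x, c, y, hs, ht⟩ | ⟨x, c, y, hs, ht⟩)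
          · exfalso; subst hs; subst ht
            simp only [List.length_append, List.length_cons] at hlen h1; omega
          · exfalso; subst hs; subst ht
            simp only [gt_iff_lt, List.length_append, List.length_cons] at hgt
            exact hgt (by omega)
          · exact ⟨x, c, y, hs, ht⟩
      · rw [if_pos (by omega)]
        constructor
        · intro hf; simp at hf
        · intro hoe
          rcases OneEdit_len hoe with h | h | h <;> omega

theorem loop_eq (d nd : List Char) : ∀ ps, loopA d nd ps = loopB d nd ps := by
  intro ps
  induction ps with
  | nil => rfl
  | cons p rest ih =>
    show loopA d nd (p :: rest) = loopB d nd (p :: rest)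
    simp only [loopA, loopB, ih]
    by_cases h1 : nd = pyNorm p
    · simp [h1]
    · have hiff : levenshtein_distance d p = 1 ↔ is_one_edit d p = true := by
        rw [lev_one_iff, isOneEdit_iff]
      by_cases hg : 2 < ((d.length : Int) - (p.length : Int)).natAbs
      · have hno : ¬ is_one_edit d p = true := by
          intro hoe
          rcases OneEdit_len ((isOneEdit_iff d p).mp hoe) with h | h | h <;> omega
        simp [h1, hg, hno]
      · by_cases hl : levenshtein_distance d p = 1
        · simp [h1, hg, hl, hiff.mp hl]
        · have : ¬ is_one_edit d p = true := fun h => hl (hiff.mpr h)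
          simp [h1, hg, hl, this]

-- ===== VERDICT (by name: the statement is the Claim_ definition above) =====
theorem check_typosquatting_spec : Claim_equal_check_typosquatting := by
  intro domain _
  unfold Spec_check_typosquatting check_typosquatting check_typosquatting_alt
  simp only [loop_eq]
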